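-- pv_equiv track=rewrite | github.com/kateriska/POVa-project | scripts/prepare_annotations.py | edit_labels
-- ===== SOURCE A (Python) =====
-- def edit_labels(original_label, split_warning_dict, split_complementary_dict, split_other_dict, split_information_dict, split_regulatory_dict):
--     if any(original_label in d for d in split_warning_dict):
--         new_label = "warning"
--     elif any(original_label in d for d in split_complementary_dict):
--         new_label = "complementary"
--     elif any(original_label in d for d in split_other_dict):
--         new_label = "other"
--     elif any(original_label in d for d in split_information_dict):
--         new_label = "information"
--     elif any(original_label in d for d in split_regulatory_dict):
--         new_label = "regulatory"
--
--     return new_label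
-- ===== SOURCE B (Python) =====
-- def edit_labels(original_label, split_warning_dict, split_complementary_dict, split_other_dict, split_information_dict, split_regulatory_dict):
--     # Build one key -> category index, lowest priority first so that a later
--     # (higher-priority) category overwrites, then answer by a single dict lookup.
--     category_of = {}
--     for category, collection in (("regulatory", split_regulatory_dict),
--                                  ("information", split_information_dict),
--                                  ("other", split_other_dict),
--                                  ("complementary", split_complementary_dict),
--                                  ("warning", split_warning_dict)):
--         for d in collection:
--             for key in d:
--                 category_of[key] = category
--     return category_of[original_label]
-- ===== Notes on version B (the rewrite author's own statement) =====
-- stated objective: alternative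
-- what changed: Replaces the five-branch elif cascade of membership scans by building a single key-to-category dictionary (lowest priority inserted first so higher priority overwrites) and answering with one dict lookup.
import Mathlib
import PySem

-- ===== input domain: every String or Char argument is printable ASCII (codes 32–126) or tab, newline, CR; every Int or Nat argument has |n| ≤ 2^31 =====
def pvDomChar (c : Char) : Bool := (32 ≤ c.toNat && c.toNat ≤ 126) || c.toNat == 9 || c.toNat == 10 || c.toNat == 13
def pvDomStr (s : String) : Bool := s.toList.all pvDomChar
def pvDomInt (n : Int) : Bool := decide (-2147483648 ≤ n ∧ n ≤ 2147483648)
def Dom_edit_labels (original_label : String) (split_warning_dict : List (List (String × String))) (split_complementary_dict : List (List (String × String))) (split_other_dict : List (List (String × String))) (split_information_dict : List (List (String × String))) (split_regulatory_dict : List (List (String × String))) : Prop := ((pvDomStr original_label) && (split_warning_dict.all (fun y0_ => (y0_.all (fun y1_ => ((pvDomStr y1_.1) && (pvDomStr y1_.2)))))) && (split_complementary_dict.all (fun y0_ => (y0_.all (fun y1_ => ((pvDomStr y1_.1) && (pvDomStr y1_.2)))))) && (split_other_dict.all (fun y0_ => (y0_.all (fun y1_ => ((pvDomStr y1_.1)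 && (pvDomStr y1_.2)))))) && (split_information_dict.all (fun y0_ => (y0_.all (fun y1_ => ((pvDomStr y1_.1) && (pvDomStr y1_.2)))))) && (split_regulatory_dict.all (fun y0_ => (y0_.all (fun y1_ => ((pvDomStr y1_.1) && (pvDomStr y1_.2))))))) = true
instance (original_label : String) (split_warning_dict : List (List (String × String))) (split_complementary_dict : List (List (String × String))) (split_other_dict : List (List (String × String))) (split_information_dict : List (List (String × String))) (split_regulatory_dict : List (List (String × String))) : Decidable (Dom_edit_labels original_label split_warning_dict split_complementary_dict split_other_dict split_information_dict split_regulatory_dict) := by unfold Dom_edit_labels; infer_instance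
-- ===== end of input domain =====

-- B builds one key->category dict (lowest priority inserted first, higher overwrites) and answers by a single lookup (objective: alternative).

-- ===== PORT A =====
-- `any(original_label in d for d in coll)`: dict membership tests the keys
def pvAnyHas (label : String) (coll : List (List (String × String))) : Bool :=
  coll.any (fun d => d.any (fun kv => kv.1 == label))

-- The trailing "" corresponds to the branch where Python A raises UnboundLocalError; Pre_ excludes it.
def edit_labels (original_label : String) (split_warning_dict : List (List (String × String))) (split_complementary_dict : List (List (String × String))) (split_other_dict : List (List (String × String))) (split_information_dict : List (List (String × String))) (split_regulatory_dict : List (List (String × String))) : String :=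
  if pvAnyHas original_label split_warning_dict then "warning"
  else if pvAnyHas original_label split_complementary_dict then "complementary"
  else if pvAnyHas original_label split_other_dict then "other"
  else if pvAnyHas original_label split_information_dict then "information"
  else if pvAnyHas original_label split_regulatory_dict then "regulatory"
  else ""

-- ===== PORT B =====
-- insert every key of every dict of `coll` with value `cat` (B's two inner loops)
def pvInsertColl (m : PySem.Dict String String) (cat : String) (coll : List (List (String × String))) : PySem.Dict String String :=
  coll.foldl (fun m d => d.foldl (fun m kv => m.insert kv.1 cat) m) m

-- The `none` case corresponds to Python B raising KeyError; Pre_ excludes it.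
def edit_labels_alt (original_label : String) (split_warning_dict : List (List (String × String))) (split_complementary_dict : List (List (String × String))) (split_other_dict : List (List (String × String))) (split_information_dict : List (List (String × String))) (split_regulatory_dict : List (List (String × String))) : String :=
  let m := PySem.Dict.empty
  let m := pvInsertColl m "regulatory" split_regulatory_dict
  let m := pvInsertColl m "information" split_information_dict
  let m := pvInsertColl m "other" split_other_dict
  let m := pvInsertColl m "complementary" split_complementary_dict
  let m := pvInsertColl m "warning" split_warning_dict
  match m.get? original_label with
  | some cat => cat
  | none => ""

-- ===== PRECONDITION & SPEC =====
-- Pre_ excludes exactly the inputs where the label matches no dict in any of the five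
-- collections: there Python A raises UnboundLocalError (and Python B raises KeyError).
def Pre_edit_labels (original_label : String) (split_warning_dict : List (List (String × String))) (split_complementary_dict : List (List (String × String))) (split_other_dict : List (List (String × String))) (split_information_dict : List (List (String × String))) (split_regulatory_dict : List (List (String × String))) : Prop :=
  ([split_warning_dict, split_complementary_dict, split_other_dict, split_information_dict, split_regulatory_dict].any
    (fun coll => coll.any (fun d => d.any (fun kv => kv.1 == original_label)))) = true
instance (original_label : String) (split_warning_dict : List (List (String × String))) (split_complementary_dict : List (List (String × String))) (split_other_dict : List (List (String × String))) (split_information_dict : List (List (String × String))) (split_regulatory_dict : List (List (String × String))) : Decidable (Pre_edit_labels original_label split_warning_dict split_complementary_dict split_other_dict split_information_dict split_regulatory_dict) := by unfold Pre_edit_labels; infer_instance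

def pvWitness_edit_labels : String × (List (List (String × String))) × (List (List (String × String))) × (List (List (String × String))) × (List (List (String × String))) × (List (List (String × String))) :=
  ("x", [[("x", "1")]], [], [], [], [])

def Spec_edit_labels (original_label : String) (split_warning_dict : List (List (String × String))) (split_complementary_dict : List (List (String × String))) (split_other_dict : List (List (String × String))) (split_information_dict : List (List (String × String))) (split_regulatory_dict : List (List (String × String))) (out : String) : Prop := out = edit_labels_alt original_label split_warning_dict split_complementary_dict split_other_dict split_information_dict split_regulatory_dict
instance (original_label : String) (split_warning_dict : List (List (String × String))) (split_complementary_dict : List (List (String × String))) (split_other_dict : List (List (String × String))) (split_information_dict : List (List (String × String))) (split_regulatory_dict : List (List (String × String))) (out : String) : Decidable (Spec_edit_labels original_label split_warning_dict split_complementary_dict split_other_dict split_information_dict split_regulatory_dict out) := by unfold Spec_edit_labels; infer_instance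

-- ===== CLAIM =====
def Claim_equal_edit_labels : Prop := ∀ (original_label : String) (split_warning_dict : List (List (String × String))) (split_complementary_dict : List (List (String × String))) (split_other_dict : List (List (String × String))) (split_information_dict : List (List (String × String))) (split_regulatory_dict : List (List (String × String))), Dom_edit_labels original_label split_warning_dict split_complementary_dict split_other_dict split_information_dict split_regulatory_dict → Pre_edit_labels original_label split_warning_dict split_complementary_dict split_other_dict split_information_dict split_regulatory_dict → Spec_edit_labels original_label split_warning_dict split_complementary_dict split_other_dict split_information_dict split_regulatory_dict (edit_labels original_label split_warning_dict split_complementary_dict split_other_dict split_information_dict split_regulatory_dict)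

-- ===== LEMMAS AND PROOFS =====

-- inserting every key of one dict with the constant value `cat`
lemma get?_foldl_insert_dict (d : List (String × String)) (m : PySem.Dict String String) (cat l : String) :
    (d.foldl (fun m kv => m.insert kv.1 cat) m).get? l
      = if d.any (fun kv => kv.1 == l) then some cat else m.get? l := by
  induction d generalizing m with
  | nil => simp
  | cons kv rest ih =>
    simp only [List.foldl_cons, List.any_cons, ih]
    by_cases hk : kv.1 = l
    · subst hk
      by_cases hr : rest.any (fun p => p.1 == kv.1) <;>
        simp [hr, PySem.Dict.get?_insert_self]
    · by_cases hr : rest.any (fun p => p.1 == l) <;>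
        simp [hr, hk, PySem.Dict.get?_insert, Ne.symm hk]

-- inserting every key of a whole collection with the constant value `cat`
lemma get?_pvInsertColl (coll : List (List (String × String))) (m : PySem.Dict String String) (cat l : String) :
    (pvInsertColl m cat coll).get? l
      = if pvAnyHas l coll then some cat else m.get? l := by
  induction coll generalizing m with
  | nil => simp [pvInsertColl, pvAnyHas]
  | cons d rest ih =>
    simp only [pvInsertColl, List.foldl_cons, pvAnyHas, List.any_cons] at *
    rw [ih, get?_foldl_insert_dict]
    by_cases hd : d.any (fun kv => kv.1 == l) <;>
      by_cases hr : rest.any (fun d => d.any (fun kv => kv.1 == l)) <;>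
        simp [hd, hr]

-- ===== VERDICT =====
set_option maxHeartbeats 1000000 in
theorem edit_labels_spec : Claim_equal_edit_labels := by
  intro l w c o i r _hDom hPre
  clear _hDom
  unfold Pre_edit_labels at hPre
  simp only [List.any_cons, List.any_nil, Bool.or_eq_true, Bool.or_false] at hPre
  unfold Spec_edit_labels edit_labels edit_labels_alt
  simp only [get?_pvInsertColl, PySem.Dict.get?_empty]
  by_cases hw : pvAnyHas l w <;>
  by_cases hc : pvAnyHas l c <;>
  by_cases ho : pvAnyHas l o <;>
  by_cases hi : pvAnyHas l i <;>
  by_cases hr : pvAnyHas l r <;>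
  simp_all
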